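-- pv_equiv track=rewrite | github.com/hjorthjort/advent2020 | day24/24.py | instr_to_loc
-- ===== SOURCE A (Python) =====
-- def instr_to_loc(i):
--     ew = 0
--     ns = 0
--     for x in i:
--         if x == 'e':
--             ew += 2
--         elif x == 'w':
--             ew -= 2
--         elif x == 'ne':
--             ew += 1
--             ns += 1
--         elif x == 'nw':
--             ew -= 1
--             ns += 1
--         elif x == 'se':
--             ew += 1
--             ns -= 1
--         elif x == 'sw':
--             ew -= 1
--             ns -= 1
--         else:
--             raise ValueError()
--     return ew, ns
-- ===== SOURCE B (Python) =====
-- def instr_to_loc(i):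
--     counts = {'e': 0, 'w': 0, 'ne': 0, 'nw': 0, 'se': 0, 'sw': 0}
--     for x in i:
--         if x not in counts:
--             raise ValueError()
--         counts[x] += 1
--     ew = 2 * (counts['e'] - counts['w']) \
--         + counts['ne'] - counts['nw'] + counts['se'] - counts['sw']
--     ns = counts['ne'] + counts['nw'] - counts['se'] - counts['sw']
--     return ew, ns
-- ===== Notes on version B (the rewrite author's own statement) =====
-- stated objective: alternative
-- what changed: B tallies the six direction tokens into a count dict in one pass and then computes (ew, ns) as closed-form linear combinations of the counts, instead of A's per-token branching accumulation of both coordinates.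
import Mathlib
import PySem

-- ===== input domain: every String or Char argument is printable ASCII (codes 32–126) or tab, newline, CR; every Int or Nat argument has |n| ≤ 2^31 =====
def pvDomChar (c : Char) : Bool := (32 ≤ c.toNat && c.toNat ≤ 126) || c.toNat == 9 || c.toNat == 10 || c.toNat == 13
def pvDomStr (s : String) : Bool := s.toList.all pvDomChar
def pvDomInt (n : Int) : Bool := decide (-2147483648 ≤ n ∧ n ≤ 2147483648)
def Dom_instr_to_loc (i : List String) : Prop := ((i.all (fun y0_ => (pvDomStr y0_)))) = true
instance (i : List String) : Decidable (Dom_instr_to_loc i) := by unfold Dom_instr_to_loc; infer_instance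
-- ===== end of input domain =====

-- B tallies the six direction tokens into a count dict, then computes (ew, ns) as
-- closed-form linear combinations of the counts (alternative decomposition, same cost).


-- ===== PORT A =====
-- A's loop; `none` models the `raise ValueError()` branch.
def instrLoopA : List String → Int → Int → Option (Int × Int)
  | [], ew, ns => some (ew, ns)
  | x :: rest, ew, ns =>
    if x == "e" then instrLoopA rest (ew + 2) ns
    else if x == "w" then instrLoopA rest (ew - 2) ns
    else if x == "ne" then instrLoopA rest (ew + 1) (ns + 1)
    else if x == "nw" then instrLoopA rest (ew - 1) (ns + 1)
    else if x == "se" then instrLoopA rest (ew + 1) (ns - 1)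
    else if x == "sw" then instrLoopA rest (ew - 1) (ns - 1)
    else none

def instr_to_loc (i : List String) : Int × Int := (instrLoopA i 0 0).getD (0, 0)

-- ===== PORT B =====
def instrInitB : PySem.Dict String Int :=
  PySem.Dict.ofList [("e", 0), ("w", 0), ("ne", 0), ("nw", 0), ("se", 0), ("sw", 0)]

-- B's tally loop; `none` models the `raise ValueError()` on a token not in the dict.
def instrLoopB : List String → PySem.Dict String Int → Option (PySem.Dict String Int)
  | [], c => some c
  | x :: rest, c =>
    if c.contains x then instrLoopB rest (c.modify x 0 (· + 1)) else none

def instr_to_loc_alt (i : List String) : Int × Int :=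
  match instrLoopB i instrInitB with
  | none => (0, 0)
  | some c =>
    (2 * (c.getD "e" 0 - c.getD "w" 0)
       + c.getD "ne" 0 - c.getD "nw" 0 + c.getD "se" 0 - c.getD "sw" 0,
     c.getD "ne" 0 + c.getD "nw" 0 - c.getD "se" 0 - c.getD "sw" 0)

-- ===== PRECONDITION & SPEC =====
-- A raises ValueError on any token outside the six hex directions; Pre_ admits exactly the others.
def Pre_instr_to_loc (i : List String) : Prop :=
  ∀ x ∈ i, x = "e" ∨ x = "w" ∨ x = "ne" ∨ x = "nw" ∨ x = "se" ∨ x = "sw"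
instance (i : List String) : Decidable (Pre_instr_to_loc i) := by unfold Pre_instr_to_loc; infer_instance

def pvWitness_instr_to_loc : List String := ["e", "sw", "sw", "ne", "w"]

def Spec_instr_to_loc (i : List String) (out : Int × Int) : Prop := out = instr_to_loc_alt i
instance (i : List String) (out : Int × Int) : Decidable (Spec_instr_to_loc i out) := by unfold Spec_instr_to_loc; infer_instance

-- ===== CLAIM (what is proved, stated in full; the proofs are below) =====
def Claim_equal_instr_to_loc : Prop := ∀ (i : List String), Dom_instr_to_loc i → Pre_instr_to_loc i → Spec_instr_to_loc i (instr_to_loc i)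

-- ===== LEMMAS AND PROOFS =====

lemma instrLoopA_valid (i : List String) (h : Pre_instr_to_loc i) :
    ∀ ew ns : Int, instrLoopA i ew ns =
      some (ew + 2 * ((i.count "e" : Int) - i.count "w")
              + i.count "ne" - i.count "nw" + i.count "se" - i.count "sw",
            ns + (i.count "ne" : Int) + i.count "nw" - i.count "se" - i.count "sw") := by
  induction i with
  | nil => intro ew ns; simp [instrLoopA]
  | cons x rest ih =>
    intro ew ns
    have hx := h x (List.mem_cons_self ..)
    have hrest : Pre_instr_to_loc rest := fun y hy => h y (List.mem_cons_of_mem _ hy)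
    rcases hx with h1 | h1 | h1 | h1 | h1 | h1 <;> subst h1 <;>
      simp only [instrLoopA, ih hrest, List.count_cons, String.reduceBEq, reduceIte] <;>
      exact congrArg some (by rw [Prod.mk.injEq]
                              exact ⟨by push_cast; ring, by push_cast; ring⟩)

lemma instrLoopB_valid (i : List String) :
    ∀ c : PySem.Dict String Int, (∀ x ∈ i, c.contains x = true) →
      instrLoopB i c = some (i.foldl (fun d x => d.modify x 0 (· + 1)) c) := by
  induction i with
  | nil => intro c _; simp [instrLoopB]
  | cons x rest ih =>
    intro c hc
    have hx : c.contains x = true := hc x (List.mem_cons_self ..)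
    simp only [instrLoopB, hx, if_true, List.foldl_cons]
    exact ih _ (fun y hy => by
      rw [PySem.Dict.contains_modify]
      simp [hc y (List.mem_cons_of_mem _ hy)])

-- ===== VERDICT (by name: the statement is the Claim_ definition above) =====
theorem instr_to_loc_spec : Claim_equal_instr_to_loc := by
  intro i _ hpre
  unfold Spec_instr_to_loc instr_to_loc instr_to_loc_alt
  have hb := instrLoopB_valid i instrInitB (by
    intro x hx
    rcases hpre x hx with h | h | h | h | h | h <;> subst h <;> decide)
  rw [instrLoopA_valid i hpre, hb]
  simp only [Option.getD_some, PySem.Dict.getD_foldl_modify_add_one]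
  have he : instrInitB.getD "e" 0 = 0 := by decide
  have hw : instrInitB.getD "w" 0 = 0 := by decide
  have hne : instrInitB.getD "ne" 0 = 0 := by decide
  have hnw : instrInitB.getD "nw" 0 = 0 := by decide
  have hse : instrInitB.getD "se" 0 = 0 := by decide
  have hsw : instrInitB.getD "sw" 0 = 0 := by decide
  rw [he, hw, hne, hnw, hse, hsw]
  congr 1 <;> ring
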